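-- pv_equiv track=rewrite | github.com/alekos-bigo/aisd-labs | lab7/2.py | check_plagiarism
-- ===== SOURCE A (Python) =====
-- def check_plagiarism(original_hashed_words: list, plagiarism_hashed_words: list):
--     if all(word in original_hashed_words for word in plagiarism_hashed_words):
--         return 3 * len(plagiarism_hashed_words)
--     words_c = 0
--     for word in set(original_hashed_words):
--         if word in plagiarism_hashed_words:
--             words_c += 3 * plagiarism_hashed_words.count(word)
--     return words_c
-- ===== SOURCE B (Python) =====
-- def check_plagiarism(original_hashed_words: list, plagiarism_hashed_words: list):
--     original = set(original_hashed_words)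
--     return 3 * sum(1 for word in plagiarism_hashed_words if word in original)
-- ===== Notes on version B (the rewrite author's own statement) =====
-- stated objective: faster
-- what changed: Both of A's branches reduce to 3x the number of plagiarism words present in original; B builds a set of original words once and makes one pass over plagiarism_hashed_words counting membership, dropping the all()-guard branch and the loop over set(original) with repeated .count scans.
import Mathlib
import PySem

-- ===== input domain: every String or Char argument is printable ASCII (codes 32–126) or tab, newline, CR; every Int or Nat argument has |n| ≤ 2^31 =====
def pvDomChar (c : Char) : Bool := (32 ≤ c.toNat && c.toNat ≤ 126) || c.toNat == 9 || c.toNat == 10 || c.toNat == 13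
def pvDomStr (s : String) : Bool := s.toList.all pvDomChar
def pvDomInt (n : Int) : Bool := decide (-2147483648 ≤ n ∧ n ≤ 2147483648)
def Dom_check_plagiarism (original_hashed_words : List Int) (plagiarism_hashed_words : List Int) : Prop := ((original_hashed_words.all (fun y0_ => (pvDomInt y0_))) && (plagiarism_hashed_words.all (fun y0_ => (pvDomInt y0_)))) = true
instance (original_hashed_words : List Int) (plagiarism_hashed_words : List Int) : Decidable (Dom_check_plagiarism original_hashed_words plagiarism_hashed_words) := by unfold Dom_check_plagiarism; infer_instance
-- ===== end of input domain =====

-- B replaces A's all()-guard plus loop over set(original) with repeated .count scans by a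
-- single membership-counting pass over plagiarism_hashed_words (objective: faster, O(n+m) vs O(n*m)).

-- ===== PORT A =====
def check_plagiarism (original_hashed_words : List Int) (plagiarism_hashed_words : List Int) : Int :=
  if plagiarism_hashed_words.all (fun word => original_hashed_words.contains word) then
    3 * (plagiarism_hashed_words.length : Int)
  else
    -- for word in set(original_hashed_words): summing is order-independent, so Set.ofList's order is safe
    (PySem.Set.ofList original_hashed_words).foldl
      (fun words_c word =>
        if plagiarism_hashed_words.contains word then
          words_c + 3 * (plagiarism_hashed_words.count word : Int)
        else words_c) 0

-- ===== PORT B =====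
def check_plagiarism_alt (original_hashed_words : List Int) (plagiarism_hashed_words : List Int) : Int :=
  let original : PySem.Set Int := PySem.Set.ofList original_hashed_words
  3 * ((plagiarism_hashed_words.countP (fun word => PySem.Set.contains original word)) : Int)

-- ===== PRECONDITION & SPEC =====
def Spec_check_plagiarism (original_hashed_words : List Int) (plagiarism_hashed_words : List Int) (out : Int) : Prop := out = check_plagiarism_alt original_hashed_words plagiarism_hashed_words
instance (original_hashed_words : List Int) (plagiarism_hashed_words : List Int) (out : Int) : Decidable (Spec_check_plagiarism original_hashed_words plagiarism_hashed_words out) := by unfold Spec_check_plagiarism; infer_instance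

-- ===== CLAIM (what is proved, stated in full; the proofs are below) =====
def Claim_equal_check_plagiarism : Prop := ∀ (original_hashed_words : List Int) (plagiarism_hashed_words : List Int), Dom_check_plagiarism original_hashed_words plagiarism_hashed_words → Spec_check_plagiarism original_hashed_words plagiarism_hashed_words (check_plagiarism original_hashed_words plagiarism_hashed_words)

-- ===== LEMMAS AND PROOFS =====

-- A's loop body adds 3*count even without the guard: when `contains` is false the count is 0.
theorem body_no_guard (p : List Int) (acc w : Int) :
    (if p.contains w then acc + 3 * (p.count w : Int) else acc)
      = acc + 3 * (p.count w : Int) := by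
  by_cases h : w ∈ p
  · simp [h]
  · simp [h, List.count_eq_zero.mpr h]

-- indicator sum over a duplicate-free list
theorem sum_indicator_nodup (s : List Int) (hs : s.Nodup) (x : Int) :
    (s.map (fun w => if x = w then (1 : Int) else 0)).sum
      = (if x ∈ s then (1 : Int) else 0) := by
  induction s with
  | nil => simp
  | cons a t ih =>
    rcases List.nodup_cons.mp hs with ⟨ha, ht⟩
    by_cases hxa : x = a
    · subst hxa
      simp [ih ht, ha]
    · simp [hxa, ih ht]

-- summing each distinct word's multiplicity in p over a duplicate-free list s counts p's members of s
theorem sum_count_nodup (s : List Int) (hs : s.Nodup) (p : List Int) :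
    (s.map (fun w => (p.count w : Int))).sum
      = ((p.countP (fun w => s.contains w)) : Int) := by
  induction p with
  | nil => simp
  | cons x t ih =>
    have hc : ∀ w : Int, ((x :: t).count w : Int)
        = (t.count w : Int) + (if x = w then (1 : Int) else 0) := by
      intro w
      by_cases h : x = w
      · simp [h]
      · simp [fun h' => h (by exact h')]
    simp only [hc]
    rw [PySem.List.sum_map_add_int]  -- PySem lemma: sum of pointwise sums splits
    rw [ih, sum_indicator_nodup s hs x]
    by_cases hx : x ∈ s
    · simp [hx]
    · simp [hx]

-- the fold in A's else branch equals B's value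
theorem fold_eq (o p : List Int) :
    (PySem.Set.ofList o).foldl
      (fun words_c word =>
        if p.contains word then words_c + 3 * (p.count word : Int) else words_c) 0
      = 3 * ((p.countP (fun word => PySem.Set.contains (PySem.Set.ofList o) word)) : Int) := by
  have h1 : (PySem.Set.ofList o).foldl
      (fun words_c word =>
        if p.contains word then words_c + 3 * (p.count word : Int) else words_c) 0
      = (PySem.Set.ofList o).foldl (fun words_c word => words_c + 3 * (p.count word : Int)) 0 := by
    apply PySem.List.foldl_congr_mem  -- PySem loop-shape lemma
    intro acc w _
    exact body_no_guard p acc w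
  rw [h1]
  have h2 : (PySem.Set.ofList o).foldl (fun words_c word => words_c + 3 * (p.count word : Int)) 0
      = ((PySem.Set.ofList o).map (fun w => 3 * (p.count w : Int))).sum := by
    rw [PySem.List.foldl_add]; ring
  rw [h2]
  have h3 : ((PySem.Set.ofList o).map (fun w => 3 * (p.count w : Int))).sum
      = 3 * ((PySem.Set.ofList o).map (fun w => (p.count w : Int))).sum := by
    induction (PySem.Set.ofList o : List Int) with
    | nil => simp
    | cons a t ih => simp [ih]; ring
  rw [h3, sum_count_nodup _ (PySem.Set.nodup_ofList o) p]
  rfl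

-- ===== VERDICT (by name: the statement is the Claim_ definition above) =====
theorem check_plagiarism_spec : Claim_equal_check_plagiarism := by
  intro o p _
  unfold Spec_check_plagiarism check_plagiarism check_plagiarism_alt
  by_cases hall : p.all (fun word => o.contains word)
  · -- every plagiarism word is in original, so the count is the full length
    have hc : ∀ x ∈ p, x ∈ o := by
      intro x hx; simpa using List.all_eq_true.mp hall x hx
    rw [if_pos hall]
    have hcount : p.countP (fun word => PySem.Set.contains (PySem.Set.ofList o) word) = p.length :=
      List.countP_eq_length.mpr (fun w hw => by
        simpa [PySem.Set.contains, PySem.Set.mem_ofList] using hc w hw)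
    rw [show (have original := PySem.Set.ofList o;
      3 * ((List.countP (fun word => original.contains word) p : Int))) =
      3 * ((List.countP (fun word => (PySem.Set.ofList o).contains word) p : Int)) from rfl, hcount]
  · simp only [hall, if_false, Bool.false_eq_true]
    rw [fold_eq o p]
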